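-- pv_equiv track=rewrite | github.com/gianni-x/Tp1-Python | binario_balanceado.py | es_binario_balanceado
-- ===== SOURCE A (Python) =====
-- def decimal_a_binario(n:int) -> str:
--     '''
--     Requiere: un entero decimal convertible a binario en base 2.
--     Devuelve: un string con su respectivo valor binario.
--     '''
--     res:str = ""
--     while n != 0:
--         res = str(n % 2) + res
--         n = n // 2
--     return res
--
-- def es_binario_balanceado(n:int) -> bool:
--     """
--     Requiere: un numero binario en base 2.
--     Devuelve: Si es balanceado o no. Es decir, tiene la misma cantidad
--     de 0 que 1. En caso de serlo, devuelve True de lo contrario, False.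
--     """
--     binario:str = decimal_a_binario(n)
--     x:int = 0
--     uno:int = 0
--     cero:int = 0
--     while x < len(binario):
--         if binario[x] == "1":
--             uno = uno + 1
--         else:
--             cero = cero + 1
--         x = x + 1
--     return uno == cero
-- ===== SOURCE B (Python) =====
-- def es_binario_balanceado(n: int) -> bool:
--     """Single pass over the bits: count 1s and 0s directly, no binary string."""
--     unos = 0
--     ceros = 0
--     while n != 0:
--         if n % 2 == 1:
--             unos += 1
--         else:
--             ceros += 1
--         n //= 2
--     return unos == ceros
-- ===== Notes on version B (the rewrite author's own statement) =====
-- stated objective: simpler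
-- what changed: B collapses A's two stages (build a binary string, then scan it by index counting characters) into one arithmetic loop that counts the low-bit remainders while halving n, never constructing a string.
import Mathlib
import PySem

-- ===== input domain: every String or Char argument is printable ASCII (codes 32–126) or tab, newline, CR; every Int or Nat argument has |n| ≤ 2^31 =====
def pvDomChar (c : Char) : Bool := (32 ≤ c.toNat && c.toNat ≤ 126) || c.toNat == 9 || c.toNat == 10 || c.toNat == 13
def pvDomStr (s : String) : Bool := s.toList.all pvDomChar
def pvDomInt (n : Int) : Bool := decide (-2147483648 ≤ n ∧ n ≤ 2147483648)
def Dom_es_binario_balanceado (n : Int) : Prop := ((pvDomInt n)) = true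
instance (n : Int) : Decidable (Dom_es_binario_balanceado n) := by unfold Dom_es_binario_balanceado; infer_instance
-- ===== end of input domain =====

-- B collapses A's two stages (build a binary string, then index-scan it counting chars)
-- into one arithmetic loop counting the low-bit remainders; objective: simpler.


-- ===== PORT A =====
-- while n != 0: res = str(n % 2) + res; n = n // 2   (fuel bounds the loop; fuel n.toNat+1
-- suffices for every n ≥ 0, the inputs admitted by Pre_; on n < 0 Python loops forever)
def pvD2bLoop : Nat → Int → List Char → List Char
  | 0, _, res => res
  | fuel + 1, n, res =>
    if n ≠ 0 then
      pvD2bLoop fuel (PySem.Int.floordiv n 2) (PySem.Int.toChars (PySem.Int.mod n 2) ++ res)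
    else res

def decimal_a_binario (n : Int) : List Char := pvD2bLoop (n.toNat + 1) n []

-- while x < len(binario): count '1' vs other; x = x + 1  (index walk = structural walk)
def pvCountLoop : List Char → Int → Int → Int × Int
  | [], uno, cero => (uno, cero)
  | c :: rest, uno, cero =>
    if c = '1' then pvCountLoop rest (uno + 1) cero else pvCountLoop rest uno (cero + 1)

def es_binario_balanceado (n : Int) : Bool :=
  let binario := decimal_a_binario n
  let p := pvCountLoop binario 0 0
  p.1 == p.2

-- ===== PORT B =====
-- while n != 0: count n % 2 == 1 vs not; n //= 2; return unos == ceros  (same fuel bound)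
def pvAltLoop : Nat → Int → Int → Int → Bool
  | 0, _, unos, ceros => unos == ceros
  | fuel + 1, n, unos, ceros =>
    if n ≠ 0 then
      if PySem.Int.mod n 2 = 1 then
        pvAltLoop fuel (PySem.Int.floordiv n 2) (unos + 1) ceros
      else
        pvAltLoop fuel (PySem.Int.floordiv n 2) unos (ceros + 1)
    else unos == ceros

def es_binario_balanceado_alt (n : Int) : Bool := pvAltLoop (n.toNat + 1) n 0 0

-- ===== PRECONDITION & SPEC =====
-- Python A loops forever on negative n (n // 2 never reaches 0), so only n ≥ 0 is admitted.
def Pre_es_binario_balanceado (n : Int) : Prop := 0 ≤ n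
instance (n : Int) : Decidable (Pre_es_binario_balanceado n) := by unfold Pre_es_binario_balanceado; infer_instance
def pvWitness_es_binario_balanceado : Int := (9)
def Spec_es_binario_balanceado (n : Int) (out : Bool) : Prop := out = es_binario_balanceado_alt n
instance (n : Int) (out : Bool) : Decidable (Spec_es_binario_balanceado n out) := by unfold Spec_es_binario_balanceado; infer_instance

-- ===== CLAIM (what is proved, stated in full; the proofs are below) =====
def Claim_equal_es_binario_balanceado : Prop := ∀ (n : Int), Dom_es_binario_balanceado n → Pre_es_binario_balanceado n → Spec_es_binario_balanceado n (es_binario_balanceado n)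

-- ===== LEMMAS AND PROOFS =====

-- reference bit counters on Nat
def pvOnes : Nat → Int
  | 0 => 0
  | m + 1 => (if (m + 1) % 2 = 1 then 1 else 0) + pvOnes ((m + 1) / 2)
def pvZeros : Nat → Int
  | 0 => 0
  | m + 1 => (if (m + 1) % 2 = 1 then 0 else 1) + pvZeros ((m + 1) / 2)

theorem pvCountLoop_spec (l : List Char) (u c : Int) :
    pvCountLoop l u c = (u + (l.count '1' : Int), c + ((l.countP (· ≠ '1')) : Int)) := by
  induction l generalizing u c with
  | nil => simp [pvCountLoop]
  | cons x rest ih =>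
    by_cases hx : x = '1' <;>
      simp [pvCountLoop, hx, ih] <;> ring

theorem pvD2b_counts (fuel m : Nat) (hf : m ≤ fuel) (res : List Char) :
    ((pvD2bLoop fuel (m : Int) res).count '1' : Int)
        = pvOnes m + (res.count '1' : Int)
    ∧ ((pvD2bLoop fuel (m : Int) res).countP (· ≠ '1') : Int)
        = pvZeros m + ((res.countP (· ≠ '1')) : Int) := by
  induction fuel generalizing m res with
  | zero =>
    interval_cases m
    simp [pvD2bLoop, pvOnes, pvZeros]
  | succ f ih =>
    rcases Nat.eq_zero_or_pos m with hm | hm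
    · subst hm; simp [pvD2bLoop, pvOnes, pvZeros]
    · have hne : (m : Int) ≠ 0 := by exact_mod_cast Nat.pos_iff_ne_zero.mp hm
      have hdiv : PySem.Int.floordiv (m : Int) 2 = ((m / 2 : Nat) : Int) := by
        exact_mod_cast PySem.Int.floordiv_natCast m 2
      have hmod : PySem.Int.mod (m : Int) 2 = ((m % 2 : Nat) : Int) := by
        exact_mod_cast PySem.Int.mod_natCast m 2
      have hle : m / 2 ≤ f := by omega
      have ih' := ih (m / 2) hle
        (PySem.Int.toChars (PySem.Int.mod (m : Int) 2) ++ res)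
      obtain ⟨m', hm'⟩ : ∃ m', m = m' + 1 := ⟨m - 1, by omega⟩
      rcases Nat.mod_two_eq_zero_or_one m with hpar | hpar
      · have hch : PySem.Int.toChars (PySem.Int.mod (m : Int) 2) = ['0'] := by
          rw [hmod, hpar]; decide
        simp only [pvD2bLoop, hne, if_pos, ne_eq, not_false_eq_true, hch, hdiv] at ih' ⊢
        constructor
        · rw [ih'.1]; subst hm'; rw [pvOnes]
          simp [hpar]
        · rw [ih'.2]; subst hm'; rw [pvZeros]
          simp [hpar]
          ring
      · have hch : PySem.Int.toChars (PySem.Int.mod (m : Int) 2) = ['1'] := by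
          rw [hmod, hpar]; decide
        simp only [pvD2bLoop, hne, if_pos, ne_eq, not_false_eq_true, hch, hdiv] at ih' ⊢
        constructor
        · rw [ih'.1]; subst hm'; rw [pvOnes]
          simp [hpar]
          ring
        · rw [ih'.2]; subst hm'; rw [pvZeros]
          simp [hpar]

theorem pvAltLoop_spec (fuel m : Nat) (hf : m ≤ fuel) (u c : Int) :
    pvAltLoop fuel (m : Int) u c = ((u + pvOnes m) == (c + pvZeros m)) := by
  induction fuel generalizing m u c with
  | zero =>
    interval_cases m
    simp [pvAltLoop, pvOnes, pvZeros]
  | succ f ih =>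
    rcases Nat.eq_zero_or_pos m with hm | hm
    · subst hm; simp [pvAltLoop, pvOnes, pvZeros]
    · have hne : (m : Int) ≠ 0 := by exact_mod_cast Nat.pos_iff_ne_zero.mp hm
      have hdiv : PySem.Int.floordiv (m : Int) 2 = ((m / 2 : Nat) : Int) := by
        exact_mod_cast PySem.Int.floordiv_natCast m 2
      have hmod : PySem.Int.mod (m : Int) 2 = ((m % 2 : Nat) : Int) := by
        exact_mod_cast PySem.Int.mod_natCast m 2
      have hle : m / 2 ≤ f := by omega
      obtain ⟨m', hm'⟩ : ∃ m', m = m' + 1 := ⟨m - 1, by omega⟩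
      rcases Nat.mod_two_eq_zero_or_one m with hpar | hpar
      · have h1 : ¬ PySem.Int.mod (m : Int) 2 = 1 := by rw [hmod, hpar]; decide
        simp only [pvAltLoop, hne, ne_eq, not_false_eq_true, h1, if_false, hdiv,
          ih (m / 2) hle]
        subst hm'; rw [pvOnes, pvZeros]
        simp [hpar]; constructor <;> intro h <;> omega
      · have h1 : PySem.Int.mod (m : Int) 2 = 1 := by rw [hmod, hpar]; decide
        simp only [pvAltLoop, hne, ne_eq, not_false_eq_true, h1, if_pos, hdiv,
          ih (m / 2) hle]
        subst hm'; rw [pvOnes, pvZeros]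
        simp [hpar]; constructor <;> intro h <;> omega

-- ===== VERDICT (by name: the statement is the Claim_ definition above) =====
theorem es_binario_balanceado_spec : Claim_equal_es_binario_balanceado := by
  intro n _ hpre
  obtain ⟨m, rfl⟩ : ∃ m : Nat, n = (m : Int) := ⟨n.toNat, (Int.toNat_of_nonneg hpre).symm⟩
  unfold Spec_es_binario_balanceado es_binario_balanceado es_binario_balanceado_alt
    decimal_a_binario
  have hfuel : m ≤ (m : Int).toNat + 1 := by omega
  have hcounts := pvD2b_counts ((m : Int).toNat + 1) m hfuel []
  rw [pvAltLoop_spec ((m : Int).toNat + 1) m hfuel 0 0]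
  simp only [pvCountLoop_spec]
  have h1 := hcounts.1
  have h2 := hcounts.2
  simp only [List.count_nil, List.countP_nil, Int.toNat_natCast, Nat.cast_zero,
    add_zero, ne_eq, decide_not] at h1 h2
  simp only [ne_eq]
  simp only [Int.toNat_natCast]
  simp
  omega
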